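-- pv_equiv track=rewrite | github.com/Ansonyu808/dynamic-programming | memoization/5_can_construct.py | can_construct_tab
-- ===== SOURCE A (Python) =====
-- def can_construct_tab(target, word_bank):
--     dp = [False for _ in range(len(target) + 1)]
--     dp[0] = True
--
--     for i in range(len(target) + 1):
--         for word in word_bank:
--             if dp[i] == False or len(word) + i > len(target) + 1:
--                 continue
--             if target[i : len(word) + i] == word:
--                 dp[len(word) + i] = True
--     return dp[len(target)]
-- ===== SOURCE B (Python) =====
-- def can_construct_tab(target, word_bank):
--     # Backward "pull" DP over suffixes: dp[0] says whether the remaining suffix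
--     # starting at the current position is constructible; built back-to-front.
--     words = [w for w in word_bank if w]
--     dp = [True]
--     for i in range(len(target) - 1, -1, -1):
--         here = any(target.startswith(w, i) and dp[len(w) - 1] for w in words)
--         dp = [here] + dp
--     return dp[0]
-- ===== Notes on version B (the rewrite author's own statement) =====
-- stated objective: alternative
-- what changed: Replaces A's forward 'push' table (dp[i] marks later positions via full slice comparisons) with a backward 'pull' DP built back-to-front over suffix start positions: each position asks whether some non-empty bank word starts there (startswith) and the rest of the suffix is constructible.
import Mathlib
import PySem

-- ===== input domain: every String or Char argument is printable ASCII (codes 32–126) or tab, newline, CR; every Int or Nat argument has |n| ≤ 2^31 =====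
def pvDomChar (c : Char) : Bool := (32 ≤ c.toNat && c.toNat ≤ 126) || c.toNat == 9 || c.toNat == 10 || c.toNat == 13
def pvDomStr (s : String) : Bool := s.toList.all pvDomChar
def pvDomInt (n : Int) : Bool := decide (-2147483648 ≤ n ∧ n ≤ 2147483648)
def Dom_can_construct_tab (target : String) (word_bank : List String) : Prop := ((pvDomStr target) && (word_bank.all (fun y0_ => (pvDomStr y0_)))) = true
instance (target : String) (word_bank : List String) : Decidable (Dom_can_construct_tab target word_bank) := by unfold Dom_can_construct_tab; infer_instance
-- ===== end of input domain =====

-- B replaces A's forward 'push' DP table over prefixes by a backward 'pull' DP built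
-- back-to-front over suffix start positions (alternative decomposition, same exact result).


-- ===== PORT A =====
-- inner loop body: 'for word in word_bank: if dp[i]==False or len(word)+i > len(target)+1: continue; if target[i:len(word)+i]==word: dp[len(word)+i]=True'
-- (len(word) is word.toList.length; the slice is PySem.List.slice on the char list, exact)
def stepA (tgt : List Char) (i : Nat) (dp : List Bool) (word : String) : List Bool :=
  if dp.getD i false = false ∨ tgt.length + 1 < word.toList.length + i then dp
  else if PySem.List.slice tgt (some (i : Int)) (some ((word.toList.length + i : Nat) : Int)) = word.toList then
    dp.set (word.toList.length + i) true
  else dp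

def can_construct_tab (target : String) (word_bank : List String) : Bool :=
  let tgt := target.toList
  let n := tgt.length
  -- dp = [False]*(n+1); dp[0] = True
  let dp0 := (List.replicate (n + 1) false).set 0 true
  -- for i in range(len(target)+1): inner loop
  let dp := (List.range (n + 1)).foldl (fun dp i => word_bank.foldl (stepA tgt i) dp) dp0
  dp.getD n false

-- ===== PORT B =====
-- the backward loop 'for i in range(len(target)-1,-1,-1): dp = [here] + dp' as structural
-- recursion over the suffix char list; dp is the suffix table, one entry per position
def canTable (words : List (List Char)) : List Char → List Bool
  | [] => [true]
  | c :: rest =>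
      let t := canTable words rest
      -- here = any(target.startswith(w, i) and dp[len(w)-1] for w in words)
      (words.any fun w => w.isPrefixOf (c :: rest) && t.getD (w.length - 1) false) :: t

def can_construct_tab_alt (target : String) (word_bank : List String) : Bool :=
  -- words = [w for w in word_bank if w]
  let words := ((word_bank.filter (fun w => w ≠ "")).map String.toList)
  (canTable words target.toList).headD false

-- ===== PRECONDITION & SPEC =====
def Spec_can_construct_tab (target : String) (word_bank : List String) (out : Bool) : Prop := out = can_construct_tab_alt target word_bank
instance (target : String) (word_bank : List String) (out : Bool) : Decidable (Spec_can_construct_tab target word_bank out) := by unfold Spec_can_construct_tab; infer_instance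

-- ===== CLAIM (what is proved, stated in full; the proofs are below) =====
def Claim_equal_can_construct_tab : Prop := ∀ (target : String) (word_bank : List String), Dom_can_construct_tab target word_bank → Spec_can_construct_tab target word_bank (can_construct_tab target word_bank)

-- ===== LEMMAS AND PROOFS =====

-- the common semantics: the string splits into non-empty bank words
inductive Seg (ws : List (List Char)) : List Char → Prop
  | nil : Seg ws []
  | cons {w r : List Char} (hw : w ∈ ws) (hne : w ≠ []) (hr : Seg ws r) : Seg ws (w ++ r)

theorem getD_set_eq_ite (l : List Bool) (i j : Nat) (a : Bool) :
    (l.set i a).getD j false = if i = j ∧ i < l.length then a else l.getD j false := by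
  simp only [List.getD_eq_getElem?_getD, List.getElem?_set]
  split_ifs with h1 h2 <;> simp_all
  omega

-- ---- B side ----

theorem mem_filtered_iff (wb : List String) (w : List Char) :
    w ∈ (wb.filter (fun u => u ≠ "")).map String.toList ↔ (w ∈ wb.map String.toList ∧ w ≠ []) := by
  simp only [List.mem_map, List.mem_filter, decide_not, Bool.not_eq_eq_eq_not, Bool.not_true,
    decide_eq_false_iff_not]
  constructor
  · rintro ⟨u, ⟨hu, hne⟩, rfl⟩
    exact ⟨⟨u, hu, rfl⟩, fun h => hne (String.toList_eq_nil_iff.mp h)⟩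
  · rintro ⟨⟨u, hu, rfl⟩, hne⟩
    exact ⟨u, ⟨hu, fun h => hne (by subst h; rfl)⟩, rfl⟩

theorem Seg_ne_nil_inv {ws : List (List Char)} {u : List Char} (h : Seg ws u) (hne : u ≠ []) :
    ∃ w r, w ∈ ws ∧ w ≠ [] ∧ u = w ++ r ∧ Seg ws r := by
  cases h with
  | nil => exact absurd rfl hne
  | cons hw hne' hr => exact ⟨_, _, hw, hne', rfl, hr⟩

theorem canTable_getD (wb : List String) (s : List Char) :
    ∀ j, j ≤ s.length →
      (((canTable ((wb.filter (fun u => u ≠ "")).map String.toList) s).getD j false = true)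
        ↔ Seg (wb.map String.toList) (s.drop j)) := by
  induction s with
  | nil =>
    intro j hj
    have hj0 : j = 0 := by simpa using hj
    subst hj0
    simpa [canTable] using Seg.nil
  | cons c rest ih =>
    intro j hj
    cases j with
    | succ k =>
      simpa [canTable] using ih k (by simpa using hj)
    | zero =>
      simp only [canTable, List.getD_cons_zero, List.drop_zero, List.any_eq_true,
        Bool.and_eq_true, List.isPrefixOf_iff_prefix]
      constructor
      · rintro ⟨w, hwW, hpre, hrec⟩
        obtain ⟨hws, hne⟩ := (mem_filtered_iff wb w).mp hwW
        obtain ⟨r, hr⟩ := hpre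
        have hwlen : 1 ≤ w.length := by
          cases w with
          | nil => exact absurd rfl hne
          | cons _ _ => simp
        have hlen : w.length ≤ rest.length + 1 := by
          have := congrArg List.length hr
          simp at this
          omega
        have hdrop : rest.drop (w.length - 1) = r := by
          have : (c :: rest).drop w.length = r := by
            rw [← hr, List.drop_left]
          rw [← this]
          obtain ⟨k, hk⟩ : ∃ k, w.length = k + 1 := ⟨w.length - 1, by omega⟩
          rw [hk]
          simp
        have hsr : Seg (wb.map String.toList) r := by
          rw [← hdrop]
          exact (ih (w.length - 1) (by omega)).mp hrec
        rw [← hr]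
        exact Seg.cons hws hne hsr
      · intro hseg
        obtain ⟨w, r, hws, hne, heq, hr⟩ := Seg_ne_nil_inv hseg (by simp)
        refine ⟨w, (mem_filtered_iff wb w).mpr ⟨hws, hne⟩, ⟨r, heq.symm⟩, ?_⟩
        have hwlen : 1 ≤ w.length := by
          cases w with
          | nil => exact absurd rfl hne
          | cons _ _ => simp
        have hlen : w.length ≤ rest.length + 1 := by
          have := congrArg List.length heq
          simp at this
          omega
        have hdrop : rest.drop (w.length - 1) = r := by
          have : (c :: rest).drop w.length = r := by
            rw [heq, List.drop_left]
          rw [← this]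
          obtain ⟨k, hk⟩ : ∃ k, w.length = k + 1 := ⟨w.length - 1, by omega⟩
          rw [hk]
          simp
        exact (ih (w.length - 1) (by omega)).mpr (by rw [hdrop]; exact hr)

theorem headD_eq_getD_zero {α : Type} (l : List α) (d : α) : l.headD d = l.getD 0 d := by
  cases l <;> rfl

theorem alt_iff_Seg (target : String) (wb : List String) :
    (can_construct_tab_alt target wb = true) ↔ Seg (wb.map String.toList) target.toList := by
  unfold can_construct_tab_alt
  rw [headD_eq_getD_zero]
  simpa using canTable_getD wb target.toList 0 (by simp)

-- ---- A side ----

-- 'the inner body fires for (i, word) producing index j' — A's exact conditions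
def MatchA (tgt : List Char) (i : Nat) (word : String) (j : Nat) : Prop :=
  ¬ (tgt.length + 1 < word.toList.length + i) ∧
  PySem.List.slice tgt (some (i : Int)) (some ((word.toList.length + i : Nat) : Int)) = word.toList ∧
  j = word.toList.length + i

-- positions reachable after the outer loop has processed i = 0 .. i₀-1
def Reach (ws : List (List Char)) (tgt : List Char) (i₀ j : Nat) : Prop :=
  j = 0 ∨ ∃ w, w ∈ ws ∧ w ≠ [] ∧ ∃ i, i < i₀ ∧ i + w.length = j ∧
    w = (tgt.drop i).take w.length ∧ Seg ws (tgt.take i)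

theorem Reach_mono (ws : List (List Char)) (tgt : List Char) {i₀ i₁ j : Nat}
    (h : i₀ ≤ i₁) : Reach ws tgt i₀ j → Reach ws tgt i₁ j := by
  rintro (rfl | ⟨w, hw, hne, i, hi, hij, hsl, hseg⟩)
  · exact Or.inl rfl
  · exact Or.inr ⟨w, hw, hne, i, lt_of_lt_of_le hi h, hij, hsl, hseg⟩

-- last-word inversion of Seg
theorem Seg_lastWord {ws : List (List Char)} {u : List Char} (h : Seg ws u) (hne : u ≠ []) :
    ∃ v w, u = v ++ w ∧ w ∈ ws ∧ w ≠ [] ∧ Seg ws v := by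
  induction h with
  | nil => exact absurd rfl hne
  | @cons w r hw hne' hr ih =>
    by_cases hr0 : r = []
    · exact ⟨[], w, by simp [hr0], hw, hne', Seg.nil⟩
    · obtain ⟨v', w', heq, hw', hne'', hv'⟩ := ih hr0
      exact ⟨w ++ v', w', by rw [heq, List.append_assoc], hw', hne'', Seg.cons hw hne' hv'⟩

theorem Seg_append_word {ws : List (List Char)} {v w : List Char}
    (hv : Seg ws v) (hw : w ∈ ws) (hne : w ≠ []) : Seg ws (v ++ w) := by
  induction hv with
  | nil => simpa using Seg.cons hw hne Seg.nil
  | cons hw1 hne1 _ ih => rw [List.append_assoc]; exact Seg.cons hw1 hne1 ih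

theorem Reach_self_iff (ws : List (List Char)) (tgt : List Char) {i₀ i : Nat}
    (hn : i ≤ tgt.length) (hle : i ≤ i₀) :
    Reach ws tgt i₀ i ↔ Seg ws (tgt.take i) := by
  constructor
  · rintro (rfl | ⟨w, hw, hne, i', _, hij, hsl, hseg⟩)
    · simpa using Seg.nil
    · have hsplit : tgt.take i = tgt.take i' ++ (tgt.drop i').take w.length := by
        rw [← hij, List.take_add]
      rw [hsplit, ← hsl]
      exact Seg_append_word hseg hw hne
  · intro hseg
    by_cases hi0 : i = 0
    · exact Or.inl hi0
    · have htne : tgt.take i ≠ [] := by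
        intro h
        have hl := congrArg List.length h
        simp only [List.length_take, List.length_nil] at hl
        omega
      obtain ⟨v, w, heq, hw, hne, hv⟩ := Seg_lastWord hseg htne
      have hwlen : 1 ≤ w.length := by
        cases w with
        | nil => exact absurd rfl hne
        | cons _ _ => simp
      have hlsum : v.length + w.length = i := by
        have hl := congrArg List.length heq
        simp only [List.length_take, List.length_append] at hl
        omega
      have h1 : (tgt.take i).take v.length = v := by rw [heq, List.take_left]
      have h1' : (tgt.take i).take v.length = tgt.take v.length := by
        rw [List.take_take, min_eq_left (by omega)]
      have hvtake : v = tgt.take v.length := (h1.symm).trans h1'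
      have h2 : tgt.take i = tgt.take v.length ++ (tgt.drop v.length).take w.length := by
        rw [← hlsum, List.take_add]
      rw [← hvtake] at h2
      have h3 : v ++ w = v ++ (tgt.drop v.length).take w.length := heq.symm.trans h2
      have hwslice : w = (tgt.drop v.length).take w.length := List.append_cancel_left h3
      exact Or.inr ⟨w, hw, hne, v.length, by omega, by omega, hwslice, by rw [← hvtake]; exact hv⟩

theorem innerFold (tgt : List Char) (i : Nat) :
    ∀ (ws' : List String) (dp : List Bool), dp.length = tgt.length + 1 →
      ((ws'.foldl (stepA tgt i) dp).length = tgt.length + 1 ∧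
       ∀ j, j ≤ tgt.length →
        ((ws'.foldl (stepA tgt i) dp).getD j false = true ↔
          (dp.getD j false = true ∨ (dp.getD i false = true ∧ ∃ word, word ∈ ws' ∧ MatchA tgt i word j)))) := by
  intro ws'
  induction ws' with
  | nil =>
    intro dp hdp
    exact ⟨hdp, fun j hj => by simp⟩
  | cons word ws' ih =>
    intro dp hdp
    have hlen1 : (stepA tgt i dp word).length = tgt.length + 1 := by
      unfold stepA; split_ifs <;> simp [hdp]
    have hgi : (stepA tgt i dp word).getD i false = dp.getD i false := by
      unfold stepA
      split_ifs with h1 h2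
      · rfl
      · rw [getD_set_eq_ite]
        split_ifs with h3
        · have hb : dp.getD i false = true := Bool.ne_false_iff.mp (not_or.mp h1).1
          rw [hb]
        · rfl
      · rfl
    have hchar : ∀ j, j ≤ tgt.length → ((stepA tgt i dp word).getD j false = true ↔
        (dp.getD j false = true ∨ (dp.getD i false = true ∧ MatchA tgt i word j))) := by
      intro j hj
      unfold stepA
      split_ifs with h1 h2
      · constructor
        · exact Or.inl
        · rintro (h | ⟨hb, hM⟩)
          · exact h
          · rcases h1 with h1 | h1
            · rw [hb] at h1; cases h1
            · exact absurd h1 hM.1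
      · have hb : dp.getD i false = true := Bool.ne_false_iff.mp (not_or.mp h1).1
        have hguard := (not_or.mp h1).2
        rw [getD_set_eq_ite]
        split_ifs with h3
        · constructor
          · intro _
            exact Or.inr ⟨hb, hguard, h2, h3.1.symm⟩
          · intro _
            rfl
        · have hjne : j ≠ word.toList.length + i := by
            intro he
            exact h3 ⟨he.symm, by rw [hdp]; omega⟩
          constructor
          · exact Or.inl
          · rintro (h | ⟨_, hM⟩)
            · exact h
            · exact absurd hM.2.2 hjne
      · constructor
        · exact Or.inl
        · rintro (h | ⟨_, hM⟩)
          · exact h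
          · exact absurd hM.2.1 h2
    obtain ⟨hL, hC⟩ := ih (stepA tgt i dp word) hlen1
    refine ⟨by simpa [List.foldl_cons] using hL, ?_⟩
    intro j hj
    rw [List.foldl_cons, hC j hj, hchar j hj, hgi]
    constructor
    · rintro ((h | ⟨hb, hM⟩) | ⟨hb, word', hmem, hM⟩)
      · exact Or.inl h
      · exact Or.inr ⟨hb, word, List.mem_cons_self, hM⟩
      · exact Or.inr ⟨hb, word', List.mem_cons_of_mem _ hmem, hM⟩
    · rintro (h | ⟨hb, word', hmem, hM⟩)
      · exact Or.inl (Or.inl h)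
      · rcases List.mem_cons.mp hmem with rfl | hmem'
        · exact Or.inl (Or.inr ⟨hb, hM⟩)
        · exact Or.inr ⟨hb, word', hmem', hM⟩

theorem getD_replicate_false (n j : Nat) (d : Bool) :
    (List.replicate n false).getD j d = if j < n then false else d := by
  simp only [List.getD_eq_getElem?_getD, List.getElem?_replicate]
  split_ifs <;> rfl

theorem a_iff_Seg (target : String) (wb : List String) :
    (can_construct_tab target wb = true) ↔ Seg (wb.map String.toList) target.toList := by
  have main : ∀ m, m ≤ target.toList.length + 1 →
      ((((List.range m).foldl (fun dp i => wb.foldl (stepA target.toList i) dp)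
          ((List.replicate (target.toList.length + 1) false).set 0 true)).length
            = target.toList.length + 1) ∧
       ∀ j, j ≤ target.toList.length →
        (((List.range m).foldl (fun dp i => wb.foldl (stepA target.toList i) dp)
          ((List.replicate (target.toList.length + 1) false).set 0 true)).getD j false = true
          ↔ Reach (wb.map String.toList) target.toList m j)) := by
    intro m
    induction m with
    | zero =>
      intro _
      constructor
      · simp
      · intro j hj
        simp only [List.range_zero, List.foldl_nil]
        rw [getD_set_eq_ite]
        constructor
        · intro h
          split_ifs at h with h0
          · exact Or.inl h0.1.symm
          · rw [getD_replicate_false] at h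
            split_ifs at h
        · rintro (rfl | ⟨w, _, _, i, hi, _⟩)
          · rw [if_pos ⟨rfl, by simp⟩]
          · exact absurd hi (Nat.not_lt_zero i)
    | succ m ih =>
      intro hm
      obtain ⟨hLm, hCm⟩ := ih (by omega)
      rw [List.range_succ, List.foldl_append, List.foldl_cons, List.foldl_nil]
      obtain ⟨hL', hC'⟩ := innerFold target.toList m wb _ hLm
      refine ⟨hL', ?_⟩
      intro j hj
      rw [hC' j hj, hCm j hj, hCm m (by omega)]
      constructor
      · rintro (h | ⟨hmm, word, hmem, hguard, hslice, hj'⟩)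
        · exact Reach_mono _ _ (Nat.le_succ m) h
        · have hseg : Seg (wb.map String.toList) (target.toList.take m) :=
            (Reach_self_iff _ _ (by omega) le_rfl).mp hmm
          rw [PySem.List.slice_natCast] at hslice
          simp only [Nat.add_sub_cancel] at hslice
          by_cases hw0 : word.toList.length = 0
          · have hjm : j = m := by omega
            subst hjm
            exact (Reach_self_iff _ _ (by omega) (by omega)).mpr hseg
          · refine Or.inr ⟨word.toList, List.mem_map_of_mem hmem, ?_, m, by omega, by omega,
              hslice.symm, hseg⟩
            intro h0
            rw [h0] at hw0
            exact hw0 rfl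
      · rintro (rfl | ⟨w, hws, hne, i', hi', hsum, hsl, hseg⟩)
        · exact Or.inl (Or.inl rfl)
        · by_cases hlt : i' < m
          · exact Or.inl (Or.inr ⟨w, hws, hne, i', hlt, hsum, hsl, hseg⟩)
          · have him : i' = m := by omega
            subst him
            obtain ⟨word, hmem, rfl⟩ := List.mem_map.mp hws
            refine Or.inr ⟨(Reach_self_iff _ _ (by omega) le_rfl).mpr hseg, word, hmem,
              by omega, ?_, by omega⟩
            rw [PySem.List.slice_natCast]
            simp only [Nat.add_sub_cancel]
            exact hsl.symm
  obtain ⟨_, hC⟩ := main (target.toList.length + 1) le_rfl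
  unfold can_construct_tab
  rw [hC target.toList.length le_rfl,
    Reach_self_iff _ _ le_rfl (by omega), List.take_length]

-- ===== VERDICT (by name: the statement is the Claim_ definition above) =====
theorem can_construct_tab_spec : Claim_equal_can_construct_tab := by
  intro target wb _
  unfold Spec_can_construct_tab
  rw [Bool.eq_iff_iff, a_iff_Seg, alt_iff_Seg]
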